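-- pv_equiv track=rewrite | github.com/michael-manders/Competitive-Programming | Competitions/2023/Frozen Eagle/lacucaracha/solution.py | count_bishop_moves
-- ===== SOURCE A (Python) =====
-- def count_bishop_moves(board):
--     if not board or not board[0]:
--         return 0
--
--     rows, cols = len(board), len(board[0])
--     total_moves = 0
--
--     for i in range(rows):
--         for j in range(cols):
--             if board[i][j] == 1:
--                 # Count moves in all four diagonal directions
--                 total_moves += count_diagonal_moves(board, i, j, 1, 1)  # Top-right
--                 total_moves += count_diagonal_moves(board, i, j, 1, -1)  # Top-left
--                 total_moves += count_diagonal_moves(board, i, j, -1, 1)  # Bottom-right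
--                 total_moves += count_diagonal_moves(board, i, j, -1, -1)  # Bottom-left
--
--     return total_moves
--
-- def count_diagonal_moves(board, row, col, row_dir, col_dir):
--     moves = 0
--     rows, cols = len(board), len(board[0])
--
--     while 0 <= row + row_dir < rows and 0 <= col + col_dir < cols:
--         row += row_dir
--         col += col_dir
--         if board[row][col] == 0:
--             moves += 1
--         else:
--             break
--
--     return moves
-- ===== SOURCE B (Python) =====
-- def count_bishop_moves(board):
--     if not board or not board[0]:
--         return 0
--     R, C = len(board), len(board[0])
--     total = 0
--     # top-down pass: ul[j]/ur[j] = length of the zero run continuing up-left / up-right from (i, j)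
--     ul = [0] * C
--     ur = [0] * C
--     for i in range(R):
--         ul = [ul[j - 1] + 1 if j > 0 and i > 0 and board[i - 1][j - 1] == 0 else 0
--               for j in range(C)]
--         ur = [ur[j + 1] + 1 if j < C - 1 and i > 0 and board[i - 1][j + 1] == 0 else 0
--               for j in range(C)]
--         for j in range(C):
--             if board[i][j] == 1:
--                 total += ul[j] + ur[j]
--     # bottom-up pass: dl[j]/dr[j] = length of the zero run continuing down-left / down-right from (i, j)
--     dl = [0] * C
--     dr = [0] * C
--     for i in range(R - 1, -1, -1):
--         dl = [dl[j - 1] + 1 if j > 0 and i < R - 1 and board[i + 1][j - 1] == 0 else 0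
--               for j in range(C)]
--         dr = [dr[j + 1] + 1 if j < C - 1 and i < R - 1 and board[i + 1][j + 1] == 0 else 0
--               for j in range(C)]
--         for j in range(C):
--             if board[i][j] == 1:
--                 total += dl[j] + dr[j]
--     return total
-- ===== Notes on version B (the rewrite author's own statement) =====
-- stated objective: alternative
-- what changed: Instead of re-walking each diagonal from every bishop cell (worst-case O(R*C*max(R,C))), B makes one top-down and one bottom-up sweep that carry per-column run-lengths of consecutive zeros in the four diagonal directions, visiting each cell O(1) times; on random boards with few 1-cells A is already effectively linear, so no measured speed-up is claimed.
-- outside the precondition, e.g. on count_bishop_moves([[1, 0], [0]]): A raises IndexError, B raises IndexError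
import Mathlib
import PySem

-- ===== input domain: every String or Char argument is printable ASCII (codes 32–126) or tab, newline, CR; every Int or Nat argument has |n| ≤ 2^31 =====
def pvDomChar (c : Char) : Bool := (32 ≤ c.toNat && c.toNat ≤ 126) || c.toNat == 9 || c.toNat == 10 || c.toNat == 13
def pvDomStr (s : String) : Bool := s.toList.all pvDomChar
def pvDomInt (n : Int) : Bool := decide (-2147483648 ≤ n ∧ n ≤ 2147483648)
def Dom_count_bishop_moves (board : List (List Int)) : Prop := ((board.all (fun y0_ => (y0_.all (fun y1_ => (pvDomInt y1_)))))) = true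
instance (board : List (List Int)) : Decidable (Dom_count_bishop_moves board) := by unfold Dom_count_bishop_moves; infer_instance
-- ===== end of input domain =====

-- B replaces A's per-bishop diagonal walks by two linear sweeps carrying zero-run lengths
-- per column for the four diagonal directions (objective: alternative single-pass algorithm).

-- ===== PORT A =====

-- board[i][j] for in-range non-negative indices (all accesses of both ports are guarded in range)
def pvAt (board : List (List Int)) (i j : Nat) : Int :=
  (board.getD i []).getD j 0

-- the while loop of count_diagonal_moves, fuel = rows + cols makes it total (always sufficient)
def cdmAux (board : List (List Int)) (rows cols rd cd : Int) : Nat → Int → Int → Int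
  | 0, _, _ => 0
  | fuel + 1, row, col =>
    if 0 ≤ row + rd ∧ row + rd < rows ∧ 0 ≤ col + cd ∧ col + cd < cols then
      if pvAt board (row + rd).toNat (col + cd).toNat = 0 then
        1 + cdmAux board rows cols rd cd fuel (row + rd) (col + cd)
      else 0
    else 0

def count_diagonal_moves (board : List (List Int)) (row col rd cd : Int) : Int :=
  cdmAux board (board.length : Int) ((board.headD []).length : Int) rd cd
    (board.length + (board.headD []).length) row col

def count_bishop_moves (board : List (List Int)) : Int :=
  if board = [] ∨ board.headD [] = [] then 0
  else
    (List.range board.length).foldl (fun acc i =>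
      (List.range (board.headD []).length).foldl (fun acc j =>
        if pvAt board i j = 1 then
          acc + count_diagonal_moves board i j 1 1
              + count_diagonal_moves board i j 1 (-1)
              + count_diagonal_moves board i j (-1) 1
              + count_diagonal_moves board i j (-1) (-1)
        else acc) acc) 0

-- ===== PORT B =====

-- one row update of the zero-run lengths, one list comprehension each in Source B
def pvStepUL (board : List (List Int)) (C i : Nat) (ul : List Int) : List Int :=
  (List.range C).map fun j =>
    if 0 < j ∧ 0 < i ∧ pvAt board (i - 1) (j - 1) = 0 then ul.getD (j - 1) 0 + 1 else 0

def pvStepUR (board : List (List Int)) (C i : Nat) (ur : List Int) : List Int :=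
  (List.range C).map fun j =>
    if j + 1 < C ∧ 0 < i ∧ pvAt board (i - 1) (j + 1) = 0 then ur.getD (j + 1) 0 + 1 else 0

def pvStepDL (board : List (List Int)) (R C i : Nat) (dl : List Int) : List Int :=
  (List.range C).map fun j =>
    if 0 < j ∧ i + 1 < R ∧ pvAt board (i + 1) (j - 1) = 0 then dl.getD (j - 1) 0 + 1 else 0

def pvStepDR (board : List (List Int)) (R C i : Nat) (dr : List Int) : List Int :=
  (List.range C).map fun j =>
    if j + 1 < C ∧ i + 1 < R ∧ pvAt board (i + 1) (j + 1) = 0 then dr.getD (j + 1) 0 + 1 else 0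

-- the inner 'for j in range(C): if board[i][j]==1: total += x[j] + y[j]'
def pvRowAdd (board : List (List Int)) (C i : Nat) (x y : List Int) (t : Int) : Int :=
  (List.range C).foldl (fun t j =>
    if pvAt board i j = 1 then t + (x.getD j 0 + y.getD j 0) else t) t

def pvUpStep (board : List (List Int)) (C : Nat)
    (s : List Int × List Int × Int) (i : Nat) : List Int × List Int × Int :=
  let ul := pvStepUL board C i s.1
  let ur := pvStepUR board C i s.2.1
  (ul, ur, pvRowAdd board C i ul ur s.2.2)

def pvDnStep (board : List (List Int)) (R C : Nat)
    (s : List Int × List Int × Int) (i : Nat) : List Int × List Int × Int :=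
  let dl := pvStepDL board R C i s.1
  let dr := pvStepDR board R C i s.2.1
  (dl, dr, pvRowAdd board C i dl dr s.2.2)

def count_bishop_moves_alt (board : List (List Int)) : Int :=
  if board = [] ∨ board.headD [] = [] then 0
  else
    ((List.range board.length).reverse.foldl
      (pvDnStep board board.length (board.headD []).length)
      (List.replicate (board.headD []).length 0, List.replicate (board.headD []).length 0,
        ((List.range board.length).foldl (pvUpStep board (board.headD []).length)
          (List.replicate (board.headD []).length 0, List.replicate (board.headD []).length 0,
            0)).2.2)).2.2

-- ===== PRECONDITION & SPEC =====
-- Pre_ excludes ragged boards on which some row is shorter than row 0 (Python A and B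
-- both raise IndexError there); on rectangular boards both Pythons return normally.
def Pre_count_bishop_moves (board : List (List Int)) : Prop :=
  ∀ row ∈ board, (board.headD []).length ≤ row.length

instance (board : List (List Int)) : Decidable (Pre_count_bishop_moves board) := by
  unfold Pre_count_bishop_moves; infer_instance

def pvWitness_count_bishop_moves : List (List Int) := [[1, 0, 0], [0, 2, 0], [1, 0, 0]]

def Spec_count_bishop_moves (board : List (List Int)) (out : Int) : Prop := out = count_bishop_moves_alt board
instance (board : List (List Int)) (out : Int) : Decidable (Spec_count_bishop_moves board out) := by unfold Spec_count_bishop_moves; infer_instance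

-- ===== CLAIM (what is proved, stated in full; the proofs are below) =====
def Claim_equal_count_bishop_moves : Prop := ∀ (board : List (List Int)), Dom_count_bishop_moves board → Pre_count_bishop_moves board → Spec_count_bishop_moves board (count_bishop_moves board)

-- ===== LEMMAS AND PROOFS =====

-- canonical zero-run lengths along the four diagonal directions, one per direction
def zUL (board : List (List Int)) : Nat → Nat → Int
  | i + 1, j + 1 => if pvAt board i j = 0 then zUL board i j + 1 else 0
  | _, _ => 0

def zUR (board : List (List Int)) (C : Nat) : Nat → Nat → Int
  | 0, _ => 0
  | i + 1, j => if j + 1 < C ∧ pvAt board i (j + 1) = 0 then zUR board C i (j + 1) + 1 else 0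

def zDL (board : List (List Int)) (R : Nat) (i j : Nat) : Int :=
  if h : i + 1 < R ∧ 0 < j ∧ pvAt board (i + 1) (j - 1) = 0 then
    zDL board R (i + 1) (j - 1) + 1
  else 0
termination_by R - i
decreasing_by omega

def zDR (board : List (List Int)) (R C : Nat) (i j : Nat) : Int :=
  if h : i + 1 < R ∧ j + 1 < C ∧ pvAt board (i + 1) (j + 1) = 0 then
    zDR board R C (i + 1) (j + 1) + 1
  else 0
termination_by R - i
decreasing_by omega

-- ---- A-side: cdmAux computes the z-functions ----

theorem getD_map_range' (f : Nat → Int) (C k : Nat) (h : k < C) :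
    ((List.range C).map f).getD k 0 = f k := by
  simp [List.getD_eq_getElem?_getD, h]

theorem zUL_zero (board : List (List Int)) (j : Nat) : zUL board 0 j = 0 := by
  cases j <;> rfl

theorem zUL_zero' (board : List (List Int)) (i : Nat) : zUL board i 0 = 0 := by
  cases i <;> rfl

theorem cdm_UL (board : List (List Int)) (R C : Nat) :
    ∀ (i j fuel : Nat), i ≤ fuel → i ≤ R → j ≤ C →
      cdmAux board R C (-1) (-1) fuel i j = zUL board i j := by
  intro i
  induction i with
  | zero =>
    intro j fuel _ _ _
    rw [zUL_zero]
    cases fuel with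
    | zero => rfl
    | succ f =>
      rw [cdmAux]
      split
      · next h => exfalso; omega
      · rfl
  | succ i ih =>
    intro j fuel hfuel hiR hjC
    obtain ⟨f, rfl⟩ : ∃ f, fuel = f + 1 := ⟨fuel - 1, by omega⟩
    cases j with
    | zero =>
      rw [zUL_zero', cdmAux]
      split
      · next h => exfalso; omega
      · rfl
    | succ j =>
      rw [cdmAux]
      split
      · next hb =>
        have h1 : ((↑(i + 1) : ℤ) + (-1)) = (↑i : ℤ) := by push_cast; ring
        have h2 : ((↑(j + 1) : ℤ) + (-1)) = (↑j : ℤ) := by push_cast; ring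
        rw [h1, h2, Int.toNat_natCast, Int.toNat_natCast]
        rw [ih j f (by omega) (by omega) (by omega), zUL]
        by_cases hv : pvAt board i j = 0
        · rw [if_pos hv, if_pos hv]; ring
        · rw [if_neg hv, if_neg hv]
      · next hb => exfalso; exact hb (by push_cast; omega)

theorem cdm_UR (board : List (List Int)) (R C : Nat) :
    ∀ (i j fuel : Nat), i ≤ fuel → i ≤ R →
      cdmAux board R C (-1) 1 fuel i j = zUR board C i j := by
  intro i
  induction i with
  | zero =>
    intro j fuel _ _
    show _ = (0 : Int)
    cases fuel with
    | zero => rfl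
    | succ f =>
      rw [cdmAux]
      split
      · next h => exfalso; omega
      · rfl
  | succ i ih =>
    intro j fuel hfuel hiR
    obtain ⟨f, rfl⟩ : ∃ f, fuel = f + 1 := ⟨fuel - 1, by omega⟩
    rw [cdmAux, zUR]
    split
    · next hb =>
      have hj : j + 1 < C := by omega
      have h1 : ((↑(i + 1) : ℤ) + (-1)) = (↑i : ℤ) := by push_cast; ring
      have h2 : ((↑j : ℤ) + 1) = (↑(j + 1) : ℤ) := by push_cast; ring
      rw [h1, h2, Int.toNat_natCast, Int.toNat_natCast]
      rw [ih (j + 1) f (by omega) (by omega)]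
      by_cases hv : pvAt board i (j + 1) = 0
      · rw [if_pos hv, if_pos ⟨hj, hv⟩]; ring
      · rw [if_neg hv, if_neg (by tauto)]
    · next hb =>
      rw [if_neg]
      intro ⟨h1, _⟩
      exact hb (by push_cast; omega)

theorem cdm_DL (board : List (List Int)) (R C : Nat) :
    ∀ (fuel i j : Nat), R ≤ fuel + i → j ≤ C →
      cdmAux board R C 1 (-1) fuel i j = zDL board R i j := by
  intro fuel
  induction fuel with
  | zero =>
    intro i j hR _
    rw [cdmAux, zDL, dif_neg (by omega)]
  | succ f ih =>
    intro i j hR hjC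
    rw [cdmAux]
    conv_rhs => rw [zDL]
    split
    · next hb =>
      have hj : 0 < j := by omega
      have h1 : ((↑i : ℤ) + 1) = (↑(i + 1) : ℤ) := by push_cast; ring
      have h2 : ((↑j : ℤ) + (-1)) = (↑(j - 1) : ℤ) := by omega
      rw [h1, h2, Int.toNat_natCast, Int.toNat_natCast]
      rw [ih (i + 1) (j - 1) (by omega) (by omega)]
      by_cases hv : pvAt board (i + 1) (j - 1) = 0
      · rw [if_pos hv, dif_pos ⟨by omega, hj, hv⟩]; ring
      · rw [if_neg hv, dif_neg (by tauto)]
    · next hb =>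
      rw [dif_neg]
      intro ⟨h1, h2, _⟩
      exact hb (by omega)

theorem cdm_DR (board : List (List Int)) (R C : Nat) :
    ∀ (fuel i j : Nat), R ≤ fuel + i →
      cdmAux board R C 1 1 fuel i j = zDR board R C i j := by
  intro fuel
  induction fuel with
  | zero =>
    intro i j hR
    rw [cdmAux, zDR, dif_neg (by omega)]
  | succ f ih =>
    intro i j hR
    rw [cdmAux]
    conv_rhs => rw [zDR]
    split
    · next hb =>
      have h1 : ((↑i : ℤ) + 1) = (↑(i + 1) : ℤ) := by push_cast; ring
      have h2 : ((↑j : ℤ) + 1) = (↑(j + 1) : ℤ) := by push_cast; ring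
      rw [h1, h2, Int.toNat_natCast, Int.toNat_natCast]
      rw [ih (i + 1) (j + 1) (by omega)]
      by_cases hv : pvAt board (i + 1) (j + 1) = 0
      · rw [if_pos hv, dif_pos ⟨by omega, by omega, hv⟩]; ring
      · rw [if_neg hv, dif_neg (by tauto)]
    · next hb =>
      rw [dif_neg]
      intro ⟨h1, h2, _⟩
      exact hb (by omega)

theorem foldl_pointwise (f : Int → Nat → Int) (F : Nat → Int)
    (hf : ∀ a i, f a i = a + F i) (l : List Nat) (a : Int) :
    l.foldl f a = a + (l.map F).sum := by
  induction l generalizing a with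
  | nil => simp
  | cons x xs ih => simp [List.foldl_cons, hf, ih, add_assoc]

theorem sum_map_add (f g : Nat → Int) (l : List Nat) :
    (l.map fun x => f x + g x).sum = (l.map f).sum + (l.map g).sum := by
  induction l with
  | nil => simp
  | cons x xs ih => simp [ih]; ring

-- ---- B-side: row states equal the z-functions ----

-- iterated row states of the two passes
def ulA (board : List (List Int)) (C : Nat) : Nat → List Int
  | 0 => List.replicate C 0
  | n + 1 => pvStepUL board C n (ulA board C n)

def urA (board : List (List Int)) (C : Nat) : Nat → List Int
  | 0 => List.replicate C 0
  | n + 1 => pvStepUR board C n (urA board C n)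

def dlA (board : List (List Int)) (R C : Nat) : Nat → List Int
  | 0 => List.replicate C 0
  | n + 1 => pvStepDL board R C (R - 1 - n) (dlA board R C n)

def drA (board : List (List Int)) (R C : Nat) : Nat → List Int
  | 0 => List.replicate C 0
  | n + 1 => pvStepDR board R C (R - 1 - n) (drA board R C n)

theorem ulA_eq (board : List (List Int)) (C : Nat) :
    ∀ n, ulA board C (n + 1) = (List.range C).map (zUL board n) := by
  intro n
  induction n with
  | zero =>
    show pvStepUL board C 0 _ = _
    unfold pvStepUL
    apply List.map_congr_left
    intro j hj
    rw [zUL_zero, if_neg (by rintro ⟨_, h, _⟩; omega)]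
  | succ n ih =>
    show pvStepUL board C (n + 1) (ulA board C (n + 1)) = _
    rw [ih]
    unfold pvStepUL
    apply List.map_congr_left
    intro j hj
    have hjC : j < C := List.mem_range.mp hj
    cases j with
    | zero => rw [zUL_zero', if_neg (by rintro ⟨h, _⟩; omega)]
    | succ j' =>
      rw [getD_map_range' _ _ _ (by omega), zUL]
      simp only [Nat.add_sub_cancel]
      by_cases hv : pvAt board n j' = 0
      · rw [if_pos ⟨by omega, by omega, hv⟩, if_pos hv]
      · rw [if_neg (by tauto), if_neg hv]

theorem urA_eq (board : List (List Int)) (C : Nat) :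
    ∀ n, urA board C (n + 1) = (List.range C).map (zUR board C n) := by
  intro n
  induction n with
  | zero =>
    show pvStepUR board C 0 _ = _
    unfold pvStepUR
    apply List.map_congr_left
    intro j hj
    rw [show zUR board C 0 j = 0 from rfl, if_neg (by rintro ⟨_, h, _⟩; omega)]
  | succ n ih =>
    show pvStepUR board C (n + 1) (urA board C (n + 1)) = _
    rw [ih]
    unfold pvStepUR
    apply List.map_congr_left
    intro j hj
    rw [zUR]
    simp only [Nat.add_sub_cancel]
    by_cases hj1 : j + 1 < C
    · rw [getD_map_range' _ _ _ hj1]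
      by_cases hv : pvAt board n (j + 1) = 0
      · rw [if_pos ⟨hj1, by omega, hv⟩, if_pos ⟨hj1, hv⟩]
      · rw [if_neg (by tauto), if_neg (by tauto)]
    · rw [if_neg (by tauto), if_neg (by tauto)]

theorem dlA_eq (board : List (List Int)) (R C : Nat) :
    ∀ n, n < R → dlA board R C (n + 1) = (List.range C).map (zDL board R (R - 1 - n)) := by
  intro n
  induction n with
  | zero =>
    intro hR
    show pvStepDL board R C (R - 1 - 0) _ = _
    unfold pvStepDL
    apply List.map_congr_left
    intro j hj
    rw [zDL, dif_neg (by rintro ⟨h, _⟩; omega), if_neg (by rintro ⟨_, h, _⟩; omega)]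
  | succ n ih =>
    intro hR
    show pvStepDL board R C (R - 1 - (n + 1)) (dlA board R C (n + 1)) = _
    rw [ih (by omega)]
    unfold pvStepDL
    apply List.map_congr_left
    intro j hj
    have hjC : j < C := List.mem_range.mp hj
    have e : R - 1 - (n + 1) + 1 = R - 1 - n := by omega
    rw [e]
    conv_rhs => rw [zDL]
    rw [e]
    by_cases hj0 : 0 < j
    · rw [getD_map_range' _ _ _ (by omega)]
      by_cases hb : R - 1 - n < R ∧ pvAt board (R - 1 - n) (j - 1) = 0
      · rw [if_pos ⟨hj0, hb.1, hb.2⟩, dif_pos ⟨hb.1, hj0, hb.2⟩]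
      · rw [if_neg (by tauto), dif_neg (by tauto)]
    · rw [if_neg (by tauto), dif_neg (by tauto)]

theorem drA_eq (board : List (List Int)) (R C : Nat) :
    ∀ n, n < R → drA board R C (n + 1) = (List.range C).map (zDR board R C (R - 1 - n)) := by
  intro n
  induction n with
  | zero =>
    intro hR
    show pvStepDR board R C (R - 1 - 0) _ = _
    unfold pvStepDR
    apply List.map_congr_left
    intro j hj
    rw [zDR, dif_neg (by rintro ⟨h, _⟩; omega), if_neg (by rintro ⟨_, h, _⟩; omega)]
  | succ n ih =>
    intro hR
    show pvStepDR board R C (R - 1 - (n + 1)) (drA board R C (n + 1)) = _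
    rw [ih (by omega)]
    unfold pvStepDR
    apply List.map_congr_left
    intro j hj
    have hjC : j < C := List.mem_range.mp hj
    have e : R - 1 - (n + 1) + 1 = R - 1 - n := by omega
    rw [e]
    conv_rhs => rw [zDR]
    rw [e]
    by_cases hj1 : j + 1 < C
    · rw [getD_map_range' _ _ _ hj1]
      by_cases hb : R - 1 - n < R ∧ pvAt board (R - 1 - n) (j + 1) = 0
      · rw [if_pos ⟨hj1, hb.1, hb.2⟩, dif_pos ⟨hb.1, hj1, hb.2⟩]
      · rw [if_neg (by tauto), dif_neg (by tauto)]
    · rw [if_neg (by tauto), dif_neg (by tauto)]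

-- per-row contributions
def Sup (board : List (List Int)) (C i : Nat) : Int :=
  ((List.range C).map fun j =>
    if pvAt board i j = 1 then zUL board i j + zUR board C i j else 0).sum

def Sdn (board : List (List Int)) (R C i : Nat) : Int :=
  ((List.range C).map fun j =>
    if pvAt board i j = 1 then zDL board R i j + zDR board R C i j else 0).sum

theorem rowAdd_eq (board : List (List Int)) (C i : Nat) (x y : List Int) (t : Int) :
    pvRowAdd board C i x y t
      = t + ((List.range C).map fun j =>
          if pvAt board i j = 1 then x.getD j 0 + y.getD j 0 else 0).sum := by
  apply foldl_pointwise
  intro a j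
  by_cases h : pvAt board i j = 1
  · rw [if_pos h, if_pos h]
  · rw [if_neg h, if_neg h]; ring

theorem rowAdd_up (board : List (List Int)) (C n : Nat) (t : Int) :
    pvRowAdd board C n (ulA board C (n + 1)) (urA board C (n + 1)) t = t + Sup board C n := by
  rw [rowAdd_eq, Sup]
  congr 1
  refine congrArg _ (List.map_congr_left ?_)
  intro j hj
  have hjC : j < C := List.mem_range.mp hj
  rw [ulA_eq, urA_eq, getD_map_range' _ _ _ hjC, getD_map_range' _ _ _ hjC]

theorem rowAdd_dn (board : List (List Int)) (R C m : Nat) (hm : m < R) (t : Int) :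
    pvRowAdd board C m (dlA board R C (R - m)) (drA board R C (R - m)) t
      = t + Sdn board R C m := by
  have e : R - m = (R - m - 1) + 1 := by omega
  have e2 : R - 1 - (R - m - 1) = m := by omega
  rw [rowAdd_eq, e, dlA_eq _ _ _ _ (by omega), drA_eq _ _ _ _ (by omega), e2, Sdn]
  congr 1
  refine congrArg _ (List.map_congr_left ?_)
  intro j hj
  have hjC : j < C := List.mem_range.mp hj
  rw [getD_map_range' _ _ _ hjC, getD_map_range' _ _ _ hjC]

theorem up_fold (board : List (List Int)) (C : Nat) (t0 : Int) :
    ∀ n, (List.range n).foldl (pvUpStep board C)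
      (List.replicate C 0, List.replicate C 0, t0)
      = (ulA board C n, urA board C n, t0 + ((List.range n).map (Sup board C)).sum) := by
  intro n
  induction n with
  | zero => simp [ulA, urA]
  | succ n ih =>
    rw [List.range_succ, List.foldl_append, ih, List.foldl_cons, List.foldl_nil]
    show (ulA board C (n + 1), urA board C (n + 1),
        pvRowAdd board C n (ulA board C (n + 1)) (urA board C (n + 1))
          (t0 + ((List.range n).map (Sup board C)).sum)) = _
    rw [rowAdd_up, List.map_append, List.sum_append]
    simp [add_assoc]

theorem dn_fold (board : List (List Int)) (R C : Nat) :
    ∀ m, m ≤ R → ∀ t0,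
      ((List.range m).reverse).foldl (pvDnStep board R C)
        (dlA board R C (R - m), drA board R C (R - m), t0)
      = (dlA board R C R, drA board R C R,
         t0 + ((List.range m).map (Sdn board R C)).sum) := by
  intro m
  induction m with
  | zero => intro _ t0; simp
  | succ m ih =>
    intro hm t0
    have hdl : pvStepDL board R C m (dlA board R C (R - (m + 1))) = dlA board R C (R - m) := by
      have e1 : R - m = (R - (m + 1)) + 1 := by omega
      have e2 : R - 1 - (R - (m + 1)) = m := by omega
      rw [e1]
      show _ = pvStepDL board R C (R - 1 - (R - (m + 1))) (dlA board R C (R - (m + 1)))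
      rw [e2]
    have hdr : pvStepDR board R C m (drA board R C (R - (m + 1))) = drA board R C (R - m) := by
      have e1 : R - m = (R - (m + 1)) + 1 := by omega
      have e2 : R - 1 - (R - (m + 1)) = m := by omega
      rw [e1]
      show _ = pvStepDR board R C (R - 1 - (R - (m + 1))) (drA board R C (R - (m + 1)))
      rw [e2]
    have hstep : pvDnStep board R C (dlA board R C (R - (m + 1)), drA board R C (R - (m + 1)), t0) m
        = (dlA board R C (R - m), drA board R C (R - m), t0 + Sdn board R C m) := by
      show (pvStepDL board R C m (dlA board R C (R - (m + 1))),
            pvStepDR board R C m (drA board R C (R - (m + 1))),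
            pvRowAdd board C m (pvStepDL board R C m (dlA board R C (R - (m + 1))))
              (pvStepDR board R C m (drA board R C (R - (m + 1)))) t0) = _
      rw [hdl, hdr, rowAdd_dn board R C m (by omega) t0]
    rw [List.range_succ, List.reverse_append, List.reverse_singleton, List.singleton_append]
    rw [List.foldl_cons, hstep, ih (by omega)]
    rw [List.map_append, List.sum_append]
    simp
    ring

-- ===== VERDICT (by name: the statement is the Claim_ definition above) =====
theorem count_bishop_moves_spec : Claim_equal_count_bishop_moves := by
  unfold Claim_equal_count_bishop_moves
  intro board _ _
  unfold Spec_count_bishop_moves count_bishop_moves count_bishop_moves_alt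
  by_cases h0 : board = [] ∨ board.headD [] = []
  · rw [if_pos h0, if_pos h0]
  · rw [if_neg h0, if_neg h0]
    rw [up_fold board (board.headD []).length 0 board.length]
    have hdn := dn_fold board board.length (board.headD []).length board.length le_rfl
      ((ulA board (board.headD []).length board.length, urA board (board.headD []).length board.length,
        0 + ((List.range board.length).map (Sup board (board.headD []).length)).sum)).2.2
    rw [Nat.sub_self] at hdn
    rw [show dlA board board.length (board.headD []).length 0
          = List.replicate (board.headD []).length 0 from rfl,
        show drA board board.length (board.headD []).length 0
          = List.replicate (board.headD []).length 0 from rfl] at hdn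
    rw [hdn]
    show _ = 0 + ((List.range board.length).map (Sup board (board.headD []).length)).sum
          + ((List.range board.length).map (Sdn board board.length (board.headD []).length)).sum
    have hA : (List.range board.length).foldl
        (fun acc i => (List.range (board.headD []).length).foldl (fun acc j =>
          if pvAt board i j = 1 then
            acc + count_diagonal_moves board i j 1 1
                + count_diagonal_moves board i j 1 (-1)
                + count_diagonal_moves board i j (-1) 1
                + count_diagonal_moves board i j (-1) (-1)
          else acc) acc) 0
        = 0 + ((List.range board.length).map (fun i =>
            ((List.range (board.headD []).length).map (fun j =>
              if pvAt board i j = 1 then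
                count_diagonal_moves board i j 1 1
                + count_diagonal_moves board i j 1 (-1)
                + count_diagonal_moves board i j (-1) 1
                + count_diagonal_moves board i j (-1) (-1)
              else 0)).sum)).sum := by
      apply foldl_pointwise
      intro a i
      apply foldl_pointwise
      intro b j
      by_cases h : pvAt board i j = 1
      · rw [if_pos h, if_pos h]; ring
      · rw [if_neg h, if_neg h]; ring
    rw [hA]
    have h11 : ∀ i j : Nat, i ≤ board.length →
        count_diagonal_moves board i j 1 1
          = zDR board board.length (board.headD []).length i j := fun i j hi =>
      cdm_DR board _ _ (board.length + (board.headD []).length) i j (by omega)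
    have h1m : ∀ i j : Nat, i ≤ board.length → j ≤ (board.headD []).length →
        count_diagonal_moves board i j 1 (-1)
          = zDL board board.length i j := fun i j hi hj =>
      cdm_DL board _ _ (board.length + (board.headD []).length) i j (by omega) hj
    have hm1 : ∀ i j : Nat, i ≤ board.length →
        count_diagonal_moves board i j (-1) 1
          = zUR board (board.headD []).length i j := fun i j hi =>
      cdm_UR board _ _ i j (board.length + (board.headD []).length) (by omega) hi
    have hmm : ∀ i j : Nat, i ≤ board.length → j ≤ (board.headD []).length →
        count_diagonal_moves board i j (-1) (-1)
          = zUL board i j := fun i j hi hj =>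
      cdm_UL board _ _ i j (board.length + (board.headD []).length) (by omega) hi hj
    rw [add_assoc, ← sum_map_add]
    refine congrArg _ (congrArg _ (List.map_congr_left ?_))
    intro i hi
    have hiR : i < board.length := List.mem_range.mp hi
    rw [Sup, Sdn, ← sum_map_add]
    refine congrArg _ (List.map_congr_left ?_)
    intro j hj
    have hjC : j < (board.headD []).length := List.mem_range.mp hj
    by_cases h : pvAt board i j = 1
    · rw [if_pos h, if_pos h, if_pos h]
      rw [h11 i j (by omega), h1m i j (by omega) (by omega),
          hm1 i j (by omega), hmm i j (by omega) (by omega)]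
      ring
    · rw [if_neg h, if_neg h, if_neg h]; ring
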